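-- pv_equiv track=rewrite | github.com/bhjia-phys/AITP-Research-Protocol | research/knowledge-hub/knowledge_hub/source_bibtex_support.py | _ordered_bibtex_fields
-- ===== SOURCE A (Python) =====
-- def _ordered_bibtex_fields(fields: dict[str, str]) -> list[tuple[str, str]]:
--     preferred = [
--         "title",
--         "author",
--         "year",
--         "journal",
--         "booktitle",
--         "doi",
--         "eprint",
--         "archiveprefix",
--         "url",
--         "abstract",
--         "note",
--     ]
--     ordered: list[tuple[str, str]] = []
--     for key in preferred:
--         value = str(fields.get(key) or "").strip()
--         if value:
--             ordered.append((key, value))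
--     for key in sorted(fields):
--         if key in {item[0] for item in ordered}:
--             continue
--         value = str(fields.get(key) or "").strip()
--         if value:
--             ordered.append((key, value))
--     return ordered
-- ===== SOURCE B (Python) =====
-- def _ordered_bibtex_fields(fields: dict[str, str]) -> list[tuple[str, str]]:
--     preferred = [
--         "title",
--         "author",
--         "year",
--         "journal",
--         "booktitle",
--         "doi",
--         "eprint",
--         "archiveprefix",
--         "url",
--         "abstract",
--         "note",
--     ]
--     rank = {k: i for i, k in enumerate(preferred)}
--     n = len(preferred)
--     out: list[tuple[str, str]] = []
--     for key in sorted(fields, key=lambda k: (rank.get(k, n), k)):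
--         value = str(fields.get(key) or "").strip()
--         if value:
--             out.append((key, value))
--     return out
-- ===== Notes on version B (the rewrite author's own statement) =====
-- stated objective: faster
-- what changed: B replaces A's two staged scans (preferred list walk, then sorted remaining keys with a rebuilt already-emitted set) by one composite-key sort: a rank table maps each preferred key to its index, all dict keys are sorted once by (rank.get(k, 11), k), and a single uniform emit loop appends the stripped non-empty values.
import Mathlib
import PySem

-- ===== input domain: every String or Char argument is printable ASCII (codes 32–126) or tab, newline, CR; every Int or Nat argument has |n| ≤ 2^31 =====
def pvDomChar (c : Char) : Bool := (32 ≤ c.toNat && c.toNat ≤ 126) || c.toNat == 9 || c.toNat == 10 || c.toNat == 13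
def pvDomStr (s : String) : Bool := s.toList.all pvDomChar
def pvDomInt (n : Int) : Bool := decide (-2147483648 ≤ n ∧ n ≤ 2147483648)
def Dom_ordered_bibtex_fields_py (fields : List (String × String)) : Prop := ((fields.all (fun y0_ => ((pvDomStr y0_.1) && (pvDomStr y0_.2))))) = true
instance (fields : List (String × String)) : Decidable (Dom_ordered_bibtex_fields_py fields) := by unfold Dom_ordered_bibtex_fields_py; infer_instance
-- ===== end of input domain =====

-- B replaces A's two staged scans (preferred walk, then sorted rest with a rebuilt emitted-key set)
-- by ONE composite-key sort: a rank table preferred-key -> index, all keys sorted once by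
-- (rank.get(k, 11), k), then a single uniform emit loop; objective: faster (no per-iteration emitted-key set rebuild).

-- ===== PORT A =====
def ordered_bibtex_fields_py (fields : List (String × String)) : List (String × String) :=
  let d := PySem.Dict.mk fields
  let preferred : List String :=
    ["title", "author", "year", "journal", "booktitle", "doi", "eprint",
     "archiveprefix", "url", "abstract", "note"]
  let ordered := preferred.foldl (fun ordered key =>
    let value := PySem.Str.strip ((d.get? key).getD "")
    if value ≠ "" then ordered ++ [(key, value)] else ordered) ([] : List (String × String))
  (PySem.List.sorted d.keys (fun k => k) false).foldl (fun ordered key =>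
    if (PySem.Set.ofList (ordered.map (fun item => item.1))).contains key then ordered
    else
      let value := PySem.Str.strip ((d.get? key).getD "")
      if value ≠ "" then ordered ++ [(key, value)] else ordered) ordered

-- ===== PORT B =====
-- B-side helpers: the preferred list and the rank table {k: i for i, k in enumerate(preferred)}
def pvPreferredB : List String :=
  ["title", "author", "year", "journal", "booktitle", "doi", "eprint",
   "archiveprefix", "url", "abstract", "note"]
def pvRankB : PySem.Dict String Int :=
  (PySem.List.enumerate pvPreferredB).foldl (fun r p => r.insert p.2 p.1) PySem.Dict.empty

def ordered_bibtex_fields_py_alt (fields : List (String × String)) : List (String × String) :=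
  let d := PySem.Dict.mk fields
  let n := PySem.List.len pvPreferredB
  (PySem.List.sorted2 d.keys (fun k => (pvRankB.get? k).getD n) (fun k => k) false).foldl
    (fun out key =>
      let value := PySem.Str.strip ((d.get? key).getD "")
      if value ≠ "" then out ++ [(key, value)] else out) ([] : List (String × String))

-- ===== PRECONDITION & SPEC =====
-- Pre_ excludes association lists with duplicate keys: a Python dict can never hold two entries with
-- the same key, so such lists correspond to no input A is ever called with.
def Pre_ordered_bibtex_fields_py (fields : List (String × String)) : Prop :=
  (fields.map Prod.fst).Nodup
instance (fields : List (String × String)) : Decidable (Pre_ordered_bibtex_fields_py fields) := by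
  unfold Pre_ordered_bibtex_fields_py; infer_instance
def pvWitness_ordered_bibtex_fields_py : (List (String × String)) :=
  [("title", " A Title "), ("zz", "1"), ("note", "")]
def Spec_ordered_bibtex_fields_py (fields : List (String × String)) (out : List (String × String)) : Prop := out = ordered_bibtex_fields_py_alt fields
instance (fields : List (String × String)) (out : List (String × String)) : Decidable (Spec_ordered_bibtex_fields_py fields out) := by unfold Spec_ordered_bibtex_fields_py; infer_instance

-- ===== CLAIM (what is proved, stated in full; the proofs are below) =====
def Claim_equal_ordered_bibtex_fields_py : Prop := ∀ (fields : List (String × String)), Dom_ordered_bibtex_fields_py fields → Pre_ordered_bibtex_fields_py fields → Spec_ordered_bibtex_fields_py fields (ordered_bibtex_fields_py fields)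

-- ===== LEMMAS AND PROOFS =====

-- B's composite sort key, as a single value in the lexicographic order on Int × String
def pvKeyB (k : String) : Lex (Int × String) := toLex ((pvRankB.get? k).getD 11, k)

-- the emit loop 'if value: out.append((k, value))' as a filterMap
theorem pv_emit_foldl (v : String → String) (l : List String) (acc : List (String × String)) :
    l.foldl (fun out k => if v k ≠ "" then out ++ [(k, v k)] else out) acc
      = acc ++ l.filterMap (fun k => if v k ≠ "" then some (k, v k) else none) := by
  induction l generalizing acc with
  | nil => simp
  | cons k t ih =>
    rw [List.foldl_cons, List.filterMap_cons, ih]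
    by_cases h : v k = ""
    · rw [if_neg (by simp [h]), if_neg (by simp [h])]
    · rw [if_pos h, if_pos h, List.append_assoc, List.singleton_append]

-- the keys of the emitted pairs
theorem pv_emit_firsts (v : String → String) (l : List String) :
    (l.filterMap (fun k => if v k ≠ "" then some (k, v k) else none)).map Prod.fst
      = l.filter (fun k => decide (v k ≠ "")) := by
  induction l with
  | nil => simp
  | cons k t ih =>
    rw [List.filterMap_cons, List.filter_cons]
    by_cases h : v k = ""
    · rw [if_neg (by simp [h]), if_neg (by simp [h]), ih]
    · rw [if_pos h, if_pos (by simp [h]), List.map_cons, ih]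

-- A's second loop, under the invariant that the accumulator's keys are exactly the preferred keys
-- with a non-empty value, equals one filtered emit pass over the non-preferred keys
theorem pv_loop2_eq (v : String → String) (P : List String) (l : List String)
    (acc : List (String × String)) (hnd : l.Nodup)
    (hinv : ∀ k ∈ l, (k ∈ acc.map Prod.fst ↔ k ∈ P ∧ v k ≠ "")) :
    l.foldl (fun ordered key =>
        if (PySem.Set.ofList (ordered.map (fun item => item.1))).contains key then ordered
        else if v key ≠ "" then ordered ++ [(key, v key)] else ordered) acc
      = acc ++ (l.filter (fun k => !((PySem.Set.ofList P).contains k))).filterMap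
          (fun k => if v k ≠ "" then some (k, v k) else none) := by
  induction l generalizing acc with
  | nil => simp
  | cons k t ih =>
    obtain ⟨hk_t, hndt⟩ := List.nodup_cons.mp hnd
    have hmem := hinv k (by simp)
    have htail : ∀ k' ∈ t, (k' ∈ acc.map Prod.fst ↔ k' ∈ P ∧ v k' ≠ "") :=
      fun k' hk' => hinv k' (List.mem_cons_of_mem _ hk')
    have hcond : ((PySem.Set.ofList (acc.map (fun item => item.1))).contains k = true)
        ↔ k ∈ acc.map Prod.fst := by
      rw [PySem.Set.contains_iff, PySem.Set.mem_ofList]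
    have hPcont : ((PySem.Set.ofList P).contains k = true) ↔ k ∈ P := by
      rw [PySem.Set.contains_iff, PySem.Set.mem_ofList]
    simp only [List.foldl_cons]
    by_cases hin : k ∈ acc.map Prod.fst
    · have hP : k ∈ P ∧ v k ≠ "" := hmem.mp hin
      rw [if_pos (hcond.mpr hin), ih acc hndt htail,
        List.filter_cons_of_neg (p := fun k => !((PySem.Set.ofList P).contains k))
          (by simpa using hP.1)]
    · have hcf : ¬ ((PySem.Set.ofList (acc.map (fun item => item.1))).contains k = true) :=
        fun h => hin (hcond.mp h)
      rw [if_neg hcf]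
      by_cases hv : v k = ""
      · rw [if_neg (by simp [hv]), ih acc hndt htail]
        by_cases hkP : ((fun k => !((PySem.Set.ofList P).contains k)) k = true)
        · rw [List.filter_cons_of_pos (p := fun k => !((PySem.Set.ofList P).contains k)) hkP,
            List.filterMap_cons, if_neg (by simp [hv])]
        · rw [List.filter_cons_of_neg (p := fun k => !((PySem.Set.ofList P).contains k)) hkP]
      · have hkP : k ∉ P := fun hkP => hin (hmem.mpr ⟨hkP, hv⟩)
        have hPfalse : (!(PySem.Set.ofList P).contains k) = true := by
          rw [Bool.not_eq_eq_eq_not, Bool.not_true, Bool.eq_false_iff]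
          intro h; exact hkP (hPcont.mp h)
        rw [if_pos hv,
          List.filter_cons_of_pos (p := fun k => !((PySem.Set.ofList P).contains k)) hPfalse,
          List.filterMap_cons, if_pos hv,
          ih (acc ++ [(k, v k)]) hndt ?_, List.append_assoc, List.singleton_append]
        intro k' hk'
        have hne : k' ≠ k := fun h => hk_t (h ▸ hk')
        rw [List.map_append]
        simp only [List.map_cons, List.map_nil, List.mem_append, List.mem_singleton, hne,
          or_false]
        exact htail k' hk'

-- both loops of A, with the value function abstracted: A emits over preferred ++ sorted(non-preferred)
theorem pv_main_A (v : String → String) (P K : List String) (hKnd : K.Nodup) :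
    (PySem.List.sorted K (fun k => k) false).foldl
      (fun ordered key =>
        if (PySem.Set.ofList (ordered.map (fun item => item.1))).contains key then ordered
        else if v key ≠ "" then ordered ++ [(key, v key)] else ordered)
      (P.foldl (fun out key => if v key ≠ "" then out ++ [(key, v key)] else out) [])
    = (P ++ (PySem.List.sorted K (fun k => k) false).filter
          (fun k => !((PySem.Set.ofList P).contains k))).foldl
        (fun out key => if v key ≠ "" then out ++ [(key, v key)] else out) [] := by
  rw [pv_emit_foldl, pv_emit_foldl, List.nil_append, List.nil_append, List.filterMap_append,
    pv_loop2_eq v P _ _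
      ((PySem.List.sorted_perm K (fun k => k) false).nodup_iff.mpr hKnd) ?_]
  intro k _
  rw [pv_emit_firsts, List.mem_filter]
  simp

-- Python's sorted with a two-component tuple key is sorted by the lexicographic product key
theorem pv_sorted2_eq_sorted_lex {α : Type} (xs : List α) (k1 : α → Int) (k2 : α → String) :
    PySem.List.sorted2 xs k1 k2 false
      = PySem.List.sorted xs (fun x => toLex (k1 x, k2 x)) false := by
  have h : (fun a b => decide (k1 a < k1 b) || (!decide (k1 b < k1 a) && decide (k2 a < k2 b)))
      = (fun a b : α => decide (toLex (k1 a, k2 a) < toLex (k1 b, k2 b))) := by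
    funext a b
    rcases lt_trichotomy (k1 a) (k1 b) with h | h | h
    · simp [h, Prod.Lex.lt_iff]
    · simp [h, Prod.Lex.lt_iff]
    · simp [Prod.Lex.lt_iff, not_lt_of_gt h, ne_of_gt h, h]
  unfold PySem.List.sorted2 PySem.List.sorted
  simp only [if_neg (by decide : ¬ (false = true)), h]

-- the rank table: preferred keys rank below 11, everything else is absent
theorem pv_rank_keys : pvRankB.keys = pvPreferredB := by decide
theorem pv_rank_lt : ∀ k ∈ pvPreferredB, (pvRankB.get? k).getD 11 < 11 := by decide
theorem pv_rank_of_not_mem (k : String) (hk : k ∉ pvPreferredB) :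
    (pvRankB.get? k).getD 11 = 11 := by
  rw [(PySem.Dict.get?_eq_none_iff_not_mem_keys pvRankB k).mpr (pv_rank_keys ▸ hk)]
  rfl
theorem pv_pref_pairwise : pvPreferredB.Pairwise (fun a b => pvKeyB a < pvKeyB b) := by decide
theorem pv_pref_nodup : pvPreferredB.Nodup := by decide

-- B's single composite-key sort yields exactly: preferred keys present in K (in preferred order),
-- then the non-preferred keys of K in alphabetical order
theorem pv_sorted2_split (K : List String) (hKnd : K.Nodup) :
    PySem.List.sorted2 K (fun k => (pvRankB.get? k).getD 11) (fun k => k) false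
      = pvPreferredB.filter (fun k => decide (k ∈ K))
        ++ (PySem.List.sorted K (fun k => k) false).filter
             (fun k => !((PySem.Set.ofList pvPreferredB).contains k)) := by
  rw [pv_sorted2_eq_sorted_lex]
  apply PySem.List.sorted_eq_of_perm_of_pairwise_lt (key := pvKeyB)
  · -- permutation of K
    have hcont : ∀ k : String, ((PySem.Set.ofList pvPreferredB).contains k = true) ↔ k ∈ pvPreferredB := by
      intro k; rw [PySem.Set.contains_iff, PySem.Set.mem_ofList]
    have h1 : (pvPreferredB.filter (fun k => decide (k ∈ K))).Perm
        (K.filter (fun k => (PySem.Set.ofList pvPreferredB).contains k)) := by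
      refine (List.perm_ext_iff_of_nodup (pv_pref_nodup.filter _) (hKnd.filter _)).mpr ?_
      intro a
      simp only [List.mem_filter, decide_eq_true_eq, hcont]
      exact ⟨fun ⟨h, h'⟩ => ⟨h', h⟩, fun ⟨h, h'⟩ => ⟨h', h⟩⟩
    have h2 : ((PySem.List.sorted K (fun k => k) false).filter
          (fun k => !((PySem.Set.ofList pvPreferredB).contains k))).Perm
        (K.filter (fun k => !((PySem.Set.ofList pvPreferredB).contains k))) :=
      (PySem.List.sorted_perm K (fun k => k) false).filter _
    exact (h1.append h2).trans (List.filter_append_perm _ K)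
  · -- strictly increasing in the composite key
    rw [List.pairwise_append]
    have hmemS : ∀ b ∈ (PySem.List.sorted K (fun k => k) false).filter
        (fun k => !((PySem.Set.ofList pvPreferredB).contains k)), b ∉ pvPreferredB := by
      intro b hb
      obtain ⟨-, hb2⟩ := List.mem_filter.mp hb
      simp only [Bool.not_eq_eq_eq_not, Bool.not_true, Bool.eq_false_iff] at hb2
      intro hbP
      exact hb2 ((PySem.Set.contains_iff _ _).mpr ((PySem.Set.mem_ofList _ _).mpr hbP))
    refine ⟨pv_pref_pairwise.sublist List.filter_sublist, ?_, ?_⟩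
    · -- inside the sorted non-preferred block: equal rank 11, strictly increasing names
      have hSnd : (PySem.List.sorted K (fun k => k) false).Nodup :=
        (PySem.List.sorted_perm K (fun k => k) false).nodup_iff.mpr hKnd
      have hle : (PySem.List.sorted K (fun k => k) false).Pairwise (fun a b => a ≤ b) :=
        PySem.List.sorted_pairwise K (fun k => k)
      have hne : (PySem.List.sorted K (fun k => k) false).Pairwise (fun a b => a ≠ b) :=
        hSnd
      have hlt := ((hle.and hne).imp fun h => lt_of_le_of_ne h.1 h.2).sublist
        (List.filter_sublist (p := fun k => !((PySem.Set.ofList pvPreferredB).contains k)))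
      refine hlt.imp_of_mem ?_
      intro a b ha hb hab
      unfold pvKeyB
      rw [pv_rank_of_not_mem a (hmemS a ha), pv_rank_of_not_mem b (hmemS b hb),
        Prod.Lex.lt_iff]
      exact Or.inr ⟨rfl, hab⟩
    · -- across the blocks: preferred rank < 11 = non-preferred rank
      intro a ha b hb
      have haP : a ∈ pvPreferredB := (List.mem_filter.mp ha).1
      unfold pvKeyB
      rw [pv_rank_of_not_mem b (hmemS b hb), Prod.Lex.lt_iff]
      exact Or.inl (pv_rank_lt a haP)
  
-- dropping from the emit list the keys whose value filters to nothing
theorem pv_filterMap_drop {α β : Type} (f : α → Option β) (q : α → Bool) (l : List α)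
    (h : ∀ k ∈ l, q k = false → f k = none) :
    l.filterMap f = (l.filter q).filterMap f := by
  induction l with
  | nil => rfl
  | cons x t ih =>
    have ht : ∀ k ∈ t, q k = false → f k = none := fun k hk => h k (List.mem_cons_of_mem _ hk)
    rw [List.filterMap_cons, List.filter_cons]
    by_cases hq : q x = true
    · rw [if_pos hq, List.filterMap_cons, ih ht]
    · rw [h x (by simp) (Bool.eq_false_iff.mpr hq), if_neg hq, ih ht]

-- both full programs, with the dict's value function abstracted
theorem pv_combined (v : String → String) (K : List String) (hKnd : K.Nodup)
    (hout : ∀ k ∈ pvPreferredB, k ∉ K → v k = "") :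
    (PySem.List.sorted K (fun k => k) false).foldl
      (fun ordered key =>
        if (PySem.Set.ofList (ordered.map (fun item => item.1))).contains key then ordered
        else if v key ≠ "" then ordered ++ [(key, v key)] else ordered)
      (pvPreferredB.foldl (fun out key => if v key ≠ "" then out ++ [(key, v key)] else out) [])
    = (PySem.List.sorted2 K (fun k => (pvRankB.get? k).getD (PySem.List.len pvPreferredB))
          (fun k => k) false).foldl
        (fun out key => if v key ≠ "" then out ++ [(key, v key)] else out) [] := by
  rw [pv_main_A v pvPreferredB K hKnd,
    show PySem.List.len pvPreferredB = (11 : Int) from by decide, pv_sorted2_split K hKnd,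
    pv_emit_foldl, pv_emit_foldl, List.nil_append, List.nil_append,
    List.filterMap_append, List.filterMap_append]
  congr 1
  refine pv_filterMap_drop _ (fun k => decide (k ∈ K)) pvPreferredB ?_
  intro k hk hq
  rw [if_neg]
  simp [hout k hk (by simpa using hq)]

-- ===== VERDICT (by name: the statement is the Claim_ definition above) =====
theorem ordered_bibtex_fields_py_spec : Claim_equal_ordered_bibtex_fields_py := by
  intro fields _ hpre
  unfold Spec_ordered_bibtex_fields_py ordered_bibtex_fields_py ordered_bibtex_fields_py_alt
  have hKnd : ((PySem.Dict.mk fields).keys).Nodup := by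
    simpa [PySem.Dict.keys] using hpre
  refine pv_combined (fun k => PySem.Str.strip (((PySem.Dict.mk fields).get? k).getD "")) _ hKnd ?_
  intro k _ hk
  have hnone : (PySem.Dict.mk fields).get? k = none :=
    (PySem.Dict.get?_eq_none_iff_not_mem_keys _ k).mpr hk
  simp only [hnone, Option.getD_none]
  decide
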